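-- pv_equiv track=rewrite | github.com/csce585-mlsystems/csce585-midi | utils/augment_dataset.py | fast_normal_order
-- ===== SOURCE A (Python) =====
-- def fast_normal_order(pcs):
--     """
--     Calculate normal order of a list of pitch classes (integers 0-11).
--     Matches music21.chord.Chord(pcs).normalOrder but much faster.
--     """
--     # Remove duplicates and sort
--     pcs = sorted(list(set(pcs)))
--     if not pcs:
--         return []
--
--     n = len(pcs)
--     if n == 1:
--         return pcs
--
--     # Create doubled list to handle wrap-around
--     doubled = pcs + [pc + 12 for pc in pcs]
--
--     best_rotation = pcs
--     min_span = 100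
--
--     # Check all rotations of length n
--     for i in range(n):
--         # Window from i to i+n-1
--         span = doubled[i + n - 1] - doubled[i]
--
--         if span < min_span:
--             min_span = span
--             best_rotation = [x % 12 for x in doubled[i : i + n]]
--         elif span == min_span:
--             # Tie-breaking: music21 prefers the one with smaller intervals at the start
--             # This is equivalent to lexicographical comparison of the rotation
--             curr_rotation = [x % 12 for x in doubled[i : i + n]]
--             if curr_rotation < best_rotation:
--                 best_rotation = curr_rotation
--
--     return best_rotation
-- ===== SOURCE B (Python) =====
-- def fast_normal_order(pcs):
--     """
--     Normal order by candidate elimination: starts after a maximal circular gap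
--     (equivalently minimal span), then a positional tournament picks the
--     lexicographically least rotation without ever building the losing rotations.
--     """
--     s = sorted(set(pcs))
--     n = len(s)
--     if n <= 1:
--         return s
--     t = [x % 12 for x in s]
--     # circular gap preceding each start index; span of rotation i is 12 - gap[i]
--     gap = [s[0] + 12 - s[-1]] + [s[i] - s[i - 1] for i in range(1, n)]
--     g = max(gap)
--     cand = [i for i in range(n) if gap[i] == g]
--     # positional elimination: keep only candidates minimal at each position
--     for j in range(n):
--         m = min(t[(i + j) % n] for i in cand)
--         cand = [i for i in cand if t[(i + j) % n] == m]
--     i = cand[0]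
--     return t[i:] + t[:i]
-- ===== Notes on version B (the rewrite author's own statement) =====
-- stated objective: alternative
-- what changed: Replaces A's doubled-list scan that materialises every rotation and keeps a running (best_rotation, min_span) accumulator by a gap+tournament algorithm: candidate starts are those following a maximal circular gap (= minimal span), and a positional elimination tournament compares candidates one position at a time, building only the single winning rotation at the end by slicing.
import Mathlib
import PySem

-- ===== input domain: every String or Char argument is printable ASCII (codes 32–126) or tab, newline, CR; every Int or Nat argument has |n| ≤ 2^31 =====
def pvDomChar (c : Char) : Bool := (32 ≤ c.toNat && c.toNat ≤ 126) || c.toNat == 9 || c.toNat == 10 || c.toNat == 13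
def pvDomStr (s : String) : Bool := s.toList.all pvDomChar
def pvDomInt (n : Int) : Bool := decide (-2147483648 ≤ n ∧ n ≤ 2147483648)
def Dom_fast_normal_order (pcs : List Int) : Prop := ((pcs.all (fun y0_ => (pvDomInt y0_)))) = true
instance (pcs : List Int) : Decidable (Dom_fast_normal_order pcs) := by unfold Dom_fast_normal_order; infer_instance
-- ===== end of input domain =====

-- B replaces A's doubled-list rotation scan (build every rotation, keep a running best)
-- by circular gaps + a positional elimination tournament: candidate starts follow a
-- maximal gap, and positions are compared one at a time, never building losing rotations
-- (objective: alternative — a different algorithm of similar cost).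


-- ===== PORT A =====
-- literal port of A: sorted(set(pcs)); doubled list; scan all rotations keeping (best_rotation, min_span)
def fast_normal_order (pcs : List Int) : List Int :=
  let s := PySem.List.sorted (PySem.Set.ofList pcs) (fun x => x) false
  if s = [] then []
  else
    let n : Nat := s.length
    if n = 1 then s
    else
      let doubled := s ++ s.map (fun pc => pc + 12)
      -- indices i, i+n-1 and the slice are always in range here, so pyGetD with default 0 is exact
      let r := (PySem.List.pyRange 0 (n : Int) 1).foldl
        (fun (st : List Int × Int) (i : Int) =>
          let span := PySem.List.pyGetD doubled (i + (n : Int) - 1) 0 - PySem.List.pyGetD doubled i 0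
          if span < st.2 then
            ((PySem.List.slice doubled (some i) (some (i + (n : Int)))).map (fun x => PySem.Int.mod x 12), span)
          else if span = st.2 then
            let curr := (PySem.List.slice doubled (some i) (some (i + (n : Int)))).map (fun x => PySem.Int.mod x 12)
            if curr < st.1 then (curr, st.2) else st
          else st)
        (s, 100)
      r.1

-- ===== PORT B =====
-- port of B (Source B): circular gaps name the max-gap (= min-span) starts, then a
-- positional elimination tournament keeps, position by position, only the starts
-- minimal there; the single rotation returned is built at the end by slicing.
def fast_normal_order_alt (pcs : List Int) : List Int :=
  let s := PySem.List.sorted (PySem.Set.ofList pcs) (fun x => x) false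
  let n : Nat := s.length
  if n ≤ 1 then s
  else
    let t := s.map (fun x => PySem.Int.mod x 12)
    let gap := (PySem.List.pyGetD s 0 0 + 12 - PySem.List.pyGetD s (-1) 0) ::
      (PySem.List.pyRange 1 (n : Int) 1).map
        (fun i => PySem.List.pyGetD s i 0 - PySem.List.pyGetD s (i - 1) 0)
    -- max(gap): gap is nonempty, so .getD 0 never fires
    let g := (PySem.List.max? gap (fun y => y)).getD 0
    let cand0 := (PySem.List.pyRange 0 (n : Int) 1).filter
      (fun i => PySem.List.pyGetD gap i 0 == g)
    let cand := (PySem.List.pyRange 0 (n : Int) 1).foldl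
      (fun (cand : List Int) (j : Int) =>
        -- min(...): cand is never empty, so .getD 0 never fires
        let m := (PySem.List.min? (cand.map
            (fun i => PySem.List.pyGetD t (PySem.Int.mod (i + j) (n : Int)) 0)) (fun y => y)).getD 0
        cand.filter (fun i => PySem.List.pyGetD t (PySem.Int.mod (i + j) (n : Int)) 0 == m))
      cand0
    -- cand[0]: cand is never empty, so the default of pyGetD never fires
    let i := PySem.List.pyGetD cand 0 0
    PySem.List.slice t (some i) none ++ PySem.List.slice t none (some i)

-- ===== PRECONDITION & SPEC =====
def Spec_fast_normal_order (pcs : List Int) (out : List Int) : Prop := out = fast_normal_order_alt pcs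
instance (pcs : List Int) (out : List Int) : Decidable (Spec_fast_normal_order pcs out) := by unfold Spec_fast_normal_order; infer_instance

-- ===== CLAIM (what is proved, stated in full; the proofs are below) =====
def Claim_equal_fast_normal_order : Prop := ∀ (pcs : List Int), Dom_fast_normal_order pcs → Spec_fast_normal_order pcs (fast_normal_order pcs)

-- ===== LEMMAS AND PROOFS =====

-- span of the rotation starting at index i of the sorted deduplicated list s (closed form)
def pvSpan (s : List Int) (i : Nat) : Int :=
  if i = 0 then s.getD (s.length - 1) 0 - s.getD 0 0 else s.getD (i - 1) 0 + 12 - s.getD i 0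

-- the rotation starting at index i, reduced mod 12
def pvRot (s : List Int) (i : Nat) : List Int := (s.rotate i).map (fun x => PySem.Int.mod x 12)

def pvPairs (s : List Int) : List (Int × List Int) :=
  (List.range s.length).map (fun i => (pvSpan s i, pvRot s i))

-- binary minimum in the (span, then lex rotation) order, keeping the left argument on ties
def pvMin (x y : Int × List Int) : Int × List Int :=
  if y.1 < x.1 then y else if y.1 = x.1 then (if y.2 < x.2 then y else x) else x

def pvLt (x y : Int × List Int) : Prop := x.1 < y.1 ∨ (x.1 = y.1 ∧ x.2 < y.2)

theorem pvLt_irrefl (x : Int × List Int) : ¬ pvLt x x := by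
  simp [pvLt]

theorem pvLt_connex {x y : Int × List Int} (h1 : ¬ pvLt x y) (h2 : ¬ pvLt y x) : x = y := by
  rcases x with ⟨a, b⟩; rcases y with ⟨c, d⟩
  simp only [pvLt, not_or, not_and] at h1 h2
  have hac : a = c := le_antisymm (not_lt.mp h2.1) (not_lt.mp h1.1)
  have hbd : b = d := le_antisymm (not_lt.mp (h2.2 hac.symm)) (not_lt.mp (h1.2 hac))
  simp [hac, hbd]

theorem pvLe_trans {a b c : Int × List Int} (h1 : ¬ pvLt b a) (h2 : ¬ pvLt c b) : ¬ pvLt c a := by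
  rcases a with ⟨a1, a2⟩; rcases b with ⟨b1, b2⟩; rcases c with ⟨c1, c2⟩
  simp only [pvLt, not_or, not_and] at *
  have ha1 : a1 ≤ b1 := not_lt.mp h1.1
  have hb1 : b1 ≤ c1 := not_lt.mp h2.1
  refine ⟨not_lt.mpr (ha1.trans hb1), fun hca => not_lt.mpr ?_⟩
  have hba : b1 = a1 := by omega
  have hcb : c1 = b1 := by omega
  exact (not_lt.mp (h1.2 hba)).trans (not_lt.mp (h2.2 hcb))

theorem pvMin_choices (x y : Int × List Int) : pvMin x y = x ∨ pvMin x y = y := by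
  unfold pvMin; split_ifs <;> simp

theorem pvMin_le_left (x y : Int × List Int) : ¬ pvLt x (pvMin x y) := by
  unfold pvMin; split_ifs with h1 h2 h3
  · rintro (h | ⟨h, h'⟩) <;> omega
  · rintro (h | ⟨h, h'⟩)
    · omega
    · exact absurd h' (lt_asymm h3)
  · exact pvLt_irrefl _
  · exact pvLt_irrefl _

theorem pvMin_le_right (x y : Int × List Int) : ¬ pvLt y (pvMin x y) := by
  unfold pvMin; split_ifs with h1 h2 h3
  · exact pvLt_irrefl _
  · exact pvLt_irrefl _
  · rintro (h | ⟨h, h'⟩)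
    · omega
    · exact h3 h'
  · rintro (h | ⟨h, h'⟩) <;> omega

theorem pvFold_mem (l : List (Int × List Int)) (x0 : Int × List Int) :
    l.foldl pvMin x0 = x0 ∨ l.foldl pvMin x0 ∈ l := by
  induction l generalizing x0 with
  | nil => simp
  | cons p t ih =>
    simp only [List.foldl_cons, List.mem_cons]
    rcases pvMin_choices x0 p with h' | h' <;> rw [h']
    · rcases ih x0 with h | h
      · exact Or.inl h
      · exact Or.inr (Or.inr h)
    · rcases ih p with h | h
      · exact Or.inr (Or.inl h)
      · exact Or.inr (Or.inr h)

theorem pvFold_min (l : List (Int × List Int)) (x0 : Int × List Int) :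
    ∀ y, (y = x0 ∨ y ∈ l) → ¬ pvLt y (l.foldl pvMin x0) := by
  induction l generalizing x0 with
  | nil =>
    rintro y (rfl | h)
    · exact pvLt_irrefl _
    · simp at h
  | cons p t ih =>
    simp only [List.foldl_cons]
    rintro y (rfl | hy)
    · exact pvLe_trans (ih (pvMin y p) (pvMin y p) (Or.inl rfl)) (pvMin_le_left _ _)
    · rcases List.mem_cons.mp hy with rfl | hy
      · exact pvLe_trans (ih (pvMin x0 y) (pvMin x0 y) (Or.inl rfl)) (pvMin_le_right _ _)
      · exact ih (pvMin x0 p) y (Or.inr hy)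

-- A's loop step, on the swapped (best, minSpan) state
def pvStepA (st : List Int × Int) (p : Int × List Int) : List Int × Int :=
  if p.1 < st.2 then (p.2, p.1)
  else if p.1 = st.2 then (if p.2 < st.1 then (p.2, st.2) else st) else st

theorem pvStep_eq (q p : Int × List Int) :
    pvStepA (q.2, q.1) p = ((pvMin q p).2, (pvMin q p).1) := by
  unfold pvStepA pvMin; split_ifs <;> simp_all

theorem pvFold_swap (l : List (Int × List Int)) (q : Int × List Int) :
    l.foldl pvStepA (q.2, q.1) = ((l.foldl pvMin q).2, (l.foldl pvMin q).1) := by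
  induction l generalizing q with
  | nil => rfl
  | cons p t ih =>
    simp only [List.foldl_cons, pvStep_eq]
    exact ih (pvMin q p)

-- mod 12 absorbs the +12 of the doubled list
theorem pvMod_add12 (x : Int) : PySem.Int.mod (x + 12) 12 = PySem.Int.mod x 12 := by
  rw [PySem.Int.mod_eq_emod_of_pos (by norm_num : (0:Int) < 12),
      PySem.Int.mod_eq_emod_of_pos (by norm_num : (0:Int) < 12)]
  omega

theorem pvSpan_eq (s : List Int) (i : Nat) (h2 : 2 ≤ s.length) (hi : i < s.length) :
    PySem.List.pyGetD (s ++ s.map (fun pc => pc + 12)) ((i : Int) + (s.length : Int) - 1) 0 -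
      PySem.List.pyGetD (s ++ s.map (fun pc => pc + 12)) (i : Int) 0 = pvSpan s i := by
  have hc : ((i : Int) + (s.length : Int) - 1) = ((i + s.length - 1 : Nat) : Int) := by
    push_cast [Nat.cast_sub (by omega : 1 ≤ i + s.length)]; ring
  rw [hc, PySem.List.pyGetD_natCast, PySem.List.pyGetD_natCast]
  rcases Nat.eq_zero_or_pos i with rfl | hpos
  · rw [List.getD_append _ _ _ _ (by omega), List.getD_append _ _ _ _ (by omega)]
    simp [pvSpan]
  · rw [List.getD_append_right _ _ _ _ (by omega), List.getD_append _ _ _ _ (by omega)]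
    have h1 : i + s.length - 1 - s.length = i - 1 := by omega
    rw [h1, List.getD_eq_getElem _ _ (by simp; omega), List.getElem_map]
    unfold pvSpan
    rw [if_neg (by omega), List.getD_eq_getElem _ _ (by omega),
        List.getD_eq_getElem _ _ (show i - 1 < s.length from by omega)]

theorem pvRot_eq (s : List Int) (i : Nat) (hi : i < s.length) :
    (PySem.List.slice (s ++ s.map (fun pc => pc + 12)) (some (i : Int))
        (some ((i : Int) + (s.length : Int)))).map (fun x => PySem.Int.mod x 12) = pvRot s i := by
  rw [PySem.List.slice_natCast_add, List.drop_append_of_le_length (le_of_lt hi), List.take_append]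
  rw [List.take_of_length_le (by simp), show s.length - (List.drop i s).length = i by
    rw [List.length_drop]; omega, ← List.map_take]
  unfold pvRot
  rw [List.rotate_eq_drop_append_take (le_of_lt hi)]
  simp only [List.map_append, List.map_map]
  congr 1
  exact List.map_congr_left (fun x _ => pvMod_add12 x)

-- A's loop, rewritten as the pvMin fold over the (span, rotation) pairs
theorem pvA_eq (s : List Int) (h2 : 2 ≤ s.length) :
    ((PySem.List.pyRange 0 (s.length : Int) 1).foldl
      (fun (st : List Int × Int) (i : Int) =>
        let span := PySem.List.pyGetD (s ++ s.map (fun pc => pc + 12)) (i + (s.length : Int) - 1) 0 -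
          PySem.List.pyGetD (s ++ s.map (fun pc => pc + 12)) i 0
        if span < st.2 then
          ((PySem.List.slice (s ++ s.map (fun pc => pc + 12)) (some i)
              (some (i + (s.length : Int)))).map (fun x => PySem.Int.mod x 12), span)
        else if span = st.2 then
          let curr := (PySem.List.slice (s ++ s.map (fun pc => pc + 12)) (some i)
              (some (i + (s.length : Int)))).map (fun x => PySem.Int.mod x 12)
          if curr < st.1 then (curr, st.2) else st
        else st)
      (s, 100)).1
    = ((pvPairs s).foldl pvMin (100, s)).2 := by
  rw [PySem.List.pyRange_zero_natCast, List.foldl_map]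
  rw [PySem.List.foldl_congr_mem (List.range s.length) _
      (fun st i => pvStepA st (pvSpan s i, pvRot s i)) (s, 100) ?_]
  · rw [show (List.range s.length).foldl (fun st i => pvStepA st (pvSpan s i, pvRot s i)) (s, 100)
        = (pvPairs s).foldl pvStepA (s, 100) from (List.foldl_map).symm]
    have h := pvFold_swap (pvPairs s) (100, s)
    simp only at h
    rw [h]
  · intro acc i hi
    have hi' : i < s.length := List.mem_range.mp hi
    dsimp only
    rw [pvSpan_eq s i h2 hi', pvRot_eq s i hi']
    rfl

-- ---------- B side ----------

-- pyRange 1 n enumerated over Nats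
theorem pvRange_one (n : Nat) (h : 1 ≤ n) :
    PySem.List.pyRange 1 (n : Int) 1 = (List.range (n - 1)).map (fun j => ((j + 1 : Nat) : Int)) := by
  have h0 : (0 : Int) < (n : Int) := by exact_mod_cast h
  have hc := PySem.List.pyRange_one_cons (a := 0) (b := (n : Int)) h0
  rw [PySem.List.pyRange_zero_natCast] at hc
  obtain ⟨k, rfl⟩ : ∃ k, n = k + 1 := ⟨n - 1, by omega⟩
  rw [List.range_succ_eq_map, List.map_cons] at hc
  have := (List.cons.injEq _ _ _ _).mp hc
  rw [show ((0 : Int) + 1) = 1 from by norm_num] at this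
  rw [← this.2, List.map_map]
  simp

-- B's gap list is 12 minus the closed-form span of each rotation
theorem pvGaps_eq (s : List Int) (h2 : 2 ≤ s.length) :
    (PySem.List.pyGetD s 0 0 + 12 - PySem.List.pyGetD s (-1) 0) ::
      (PySem.List.pyRange 1 (s.length : Int) 1).map
        (fun i => PySem.List.pyGetD s i 0 - PySem.List.pyGetD s (i - 1) 0)
    = (List.range s.length).map (fun i => 12 - pvSpan s i) := by
  have hne : s ≠ [] := by intro h; rw [h] at h2; simp at h2
  obtain ⟨k, hk⟩ : ∃ k, s.length = k + 1 := ⟨s.length - 1, by omega⟩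
  rw [hk, List.range_succ_eq_map, List.map_cons]
  congr 1
  · rw [PySem.List.pyGetD_neg_one s 0 hne, PySem.List.pyGetD_zero]
    unfold pvSpan
    rw [if_pos rfl, List.getD_eq_getElem _ _ (by omega), List.getLast_eq_getElem]
    rw [List.getD_eq_getElem _ _ (show s.length - 1 < s.length from by omega)]
    ring
  · rw [show ((k + 1 : Nat) : Int) = ((k + 1 : Nat) : Int) from rfl, pvRange_one (k + 1) (by omega)]
    simp only [Nat.add_sub_cancel, List.map_map]
    apply List.map_congr_left
    intro j hj
    have hj' : j < k := List.mem_range.mp hj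
    simp only [Function.comp]
    rw [show ((j + 1 : Nat) : Int) - 1 = ((j : Nat) : Int) by push_cast; ring,
        PySem.List.pyGetD_natCast, PySem.List.pyGetD_natCast]
    unfold pvSpan
    rw [if_neg (by omega)]
    have : j + 1 - 1 = j := by omega
    rw [this]
    ring

-- positional value of start i at position j (what both Source B lookups compute)
def pvVal (t : List Int) (i j : Nat) : Int := t.getD ((i + j) % t.length) 0

-- B's tournament step, on Nat start indices
def pvStepB (t : List Int) (C : List Nat) (j : Nat) : List Nat :=
  let m := (PySem.List.min? (C.map (fun i => pvVal t i j)) (fun y => y)).getD 0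
  C.filter (fun i => pvVal t i j == m)

-- the tournament invariant: survivors are exactly the starts whose rotation has the
-- common minimal j-prefix, and every eliminated start's rotation is strictly above
def pvInv (t : List Int) (C0 : List Nat) (j : Nat) (S : List Nat) : Prop :=
  S ≠ [] ∧
  (∃ P, S = C0.filter (fun i => ((t.rotate i).take j == P)) ∧
    (∀ i ∈ C0, i ∉ S → ∀ i' ∈ S, t.rotate i' < t.rotate i))

theorem pvInv_zero (t : List Int) (C0 : List Nat) (h : C0 ≠ []) : pvInv t C0 0 C0 := by
  refine ⟨h, [], by simp, fun i hi hni => absurd hi hni⟩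

theorem pvLex_lt (A B : List Int) (j : Nat) (hjA : j < A.length) (hjB : j < B.length)
    (hpre : A.take j = B.take j) (hlt : A.getD j 0 < B.getD j 0) : A < B := by
  have hA : A = A.take j ++ (A[j] :: A.drop (j+1)) := by
    rw [← List.drop_eq_getElem_cons hjA, List.take_append_drop]
  have hB : B = B.take j ++ (B[j] :: B.drop (j+1)) := by
    rw [← List.drop_eq_getElem_cons hjB, List.take_append_drop]
  have hgl : A[j] < B[j] := by
    rwa [List.getD_eq_getElem _ _ hjA, List.getD_eq_getElem _ _ hjB] at hlt
  have hlex : List.Lex (· < ·) (A.take j ++ (A[j] :: A.drop (j+1))) (B.take j ++ (B[j] :: B.drop (j+1))) := by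
    rw [hpre]
    exact List.Lex.append_left _ (List.Lex.rel hgl) _
  rw [hA, hB]
  exact hlex

-- rotation prefix grows by the positional value
theorem pvTake_succ (t : List Int) (i j : Nat) (hj : j < t.length) :
    (t.rotate i).take (j + 1) = (t.rotate i).take j ++ [pvVal t i j] := by
  have hlt : j < (t.rotate i).length := by simpa using hj
  rw [List.take_add_one, List.getElem?_eq_getElem hlt]
  have : (t.rotate i)[j] = pvVal t i j := by
    rw [List.getElem_rotate]
    unfold pvVal
    rw [List.getD_eq_getElem _ _ (Nat.mod_lt _ (by omega))]
    congr 1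
    rw [Nat.add_comm]
  rw [this]
  rfl

theorem pvInv_step (t : List Int) (C0 : List Nat) (j : Nat) (S : List Nat)
    (hj : j < t.length) (h : pvInv t C0 j S) : pvInv t C0 (j + 1) (pvStepB t S j) := by
  obtain ⟨hne, P, hSeq, hdom⟩ := h
  -- the minimum value exists
  obtain ⟨m0, hm0⟩ : ∃ m0, PySem.List.min? (S.map (fun i => pvVal t i j)) (fun y => y) = some m0 := by
    cases hmin : PySem.List.min? (S.map (fun i => pvVal t i j)) (fun y => y) with
    | none => exact absurd (by simpa using (PySem.List.min?_eq_none_iff _ _).mp hmin) hne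
    | some m => exact ⟨m, rfl⟩
  have hstep : pvStepB t S j = S.filter (fun i => pvVal t i j == m0) := by
    unfold pvStepB
    rw [hm0]
    rfl
  obtain ⟨istar, histar, hvstar⟩ : ∃ i ∈ S, pvVal t i j = m0 := by
    have := PySem.List.min?_mem hm0
    simpa using this
  have hmin_le : ∀ i ∈ S, m0 ≤ pvVal t i j := by
    intro i hi
    simpa using PySem.List.min?_isMin hm0 (pvVal t i j) (List.mem_map_of_mem hi)
  have hPlen : P.length = j := by
    obtain ⟨i0, hi0⟩ := List.exists_mem_of_ne_nil S hne
    have := List.mem_filter.mp (hSeq ▸ hi0)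
    have hP : (t.rotate i0).take j = P := by simpa using this.2
    rw [← hP, List.length_take]
    simp
    omega
  have hmemS : ∀ i ∈ S, (t.rotate i).take j = P := by
    intro i hi
    have := List.mem_filter.mp (hSeq ▸ hi)
    simpa using this.2
  refine ⟨?_, P ++ [m0], ?_, ?_⟩
  · rw [hstep]
    exact List.ne_nil_of_mem (List.mem_filter.mpr ⟨histar, by simp [hvstar]⟩)
  · rw [hstep, hSeq, List.filter_filter]
    apply List.filter_congr
    intro i _
    have hiff : ((t.rotate i).take j = P ∧ pvVal t i j = m0) ↔
        (t.rotate i).take (j + 1) = P ++ [m0] := by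
      constructor
      · rintro ⟨h1, h2⟩
        rw [pvTake_succ t i j hj, h1, h2]
      · intro hEq
        rw [pvTake_succ t i j hj] at hEq
        have hlen : ((t.rotate i).take j).length = P.length := by
          rw [List.length_take, hPlen]
          simp
          omega
        obtain ⟨hA, hB⟩ := List.append_inj hEq hlen
        exact ⟨hA, by simpa using hB⟩
    rw [Bool.eq_iff_iff]
    simp only [Bool.and_eq_true, beq_iff_eq]
    exact (and_comm.trans hiff)
  · intro i hiC0 hinot i' hi'
    rw [hstep] at hinot hi'
    have hi'S : i' ∈ S := (List.mem_filter.mp hi').1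
    by_cases hiS : i ∈ S
    · have hvne : pvVal t i j ≠ m0 := by
        intro hv
        exact hinot (List.mem_filter.mpr ⟨hiS, by simp [hv]⟩)
      have hlt' : m0 < pvVal t i j := lt_of_le_of_ne (hmin_le i hiS) (Ne.symm hvne)
      have hv' : pvVal t i' j = m0 := by
        have := (List.mem_filter.mp hi').2
        simpa using this
      apply pvLex_lt _ _ j (by simpa using hj) (by simpa using hj)
      · rw [hmemS i' hi'S, hmemS i hiS]
      · have e1 : (t.rotate i').getD j 0 = pvVal t i' j := by
          have hlt : j < (t.rotate i').length := by simpa using hj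
          rw [List.getD_eq_getElem _ _ hlt, List.getElem_rotate]
          unfold pvVal
          rw [List.getD_eq_getElem _ _ (Nat.mod_lt _ (by omega))]
          congr 1
          rw [Nat.add_comm]
        have e2 : (t.rotate i).getD j 0 = pvVal t i j := by
          have hlt : j < (t.rotate i).length := by simpa using hj
          rw [List.getD_eq_getElem _ _ hlt, List.getElem_rotate]
          unfold pvVal
          rw [List.getD_eq_getElem _ _ (Nat.mod_lt _ (by omega))]
          congr 1
          rw [Nat.add_comm]
        rw [e1, e2, hv']
        exact hlt'
    · exact hdom i hiC0 hiS i' hi'S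

theorem pvHeadI_mem {α : Type} [Inhabited α] (l : List α) (h : l ≠ []) : l.headI ∈ l := by
  cases l with
  | nil => exact absurd rfl h
  | cons a t => simp [List.headI]

theorem pvInv_final (t : List Int) (C0 : List Nat) (S : List Nat)
    (h : pvInv t C0 t.length S) :
    S ≠ [] ∧ ∀ i0, i0 = S.headI → i0 ∈ C0 ∧ ∀ i ∈ C0, t.rotate i0 ≤ t.rotate i := by
  obtain ⟨hne, P, hSeq, hdom⟩ := h
  have htake : ∀ i : Nat, (t.rotate i).take t.length = t.rotate i := by
    intro i
    exact List.take_of_length_le (by simp)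
  refine ⟨hne, fun i0 hi0 => ?_⟩
  have hi0S : i0 ∈ S := hi0 ▸ pvHeadI_mem S hne
  have hi0C0 : i0 ∈ C0 := (List.mem_filter.mp (hSeq ▸ hi0S)).1
  have hi0P : t.rotate i0 = P := by
    have := (List.mem_filter.mp (hSeq ▸ hi0S)).2
    rw [← htake i0]
    simpa using this
  refine ⟨hi0C0, fun i hiC0 => ?_⟩
  by_cases hiS : i ∈ S
  · have : t.rotate i = P := by
      have := (List.mem_filter.mp (hSeq ▸ hiS)).2
      rw [← htake i]
      simpa using this
    rw [hi0P, this]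
  · exact le_of_lt (hdom i hiC0 hiS i0 hi0S)

theorem pvTournament_aux (t : List Int) (C0 : List Nat) (h : C0 ≠ []) :
    ∀ k, k ≤ t.length → pvInv t C0 k ((List.range k).foldl (pvStepB t) C0) := by
  intro k
  induction k with
  | zero =>
    intro _
    simpa using pvInv_zero t C0 h
  | succ k ih =>
    intro hk
    rw [List.range_succ, List.foldl_append, List.foldl_cons, List.foldl_nil]
    exact pvInv_step t C0 k _ (by omega) (ih (by omega))

theorem pvTournament (t : List Int) (C0 : List Nat) (h : C0 ≠ []) :
    pvInv t C0 t.length ((List.range t.length).foldl (pvStepB t) C0) :=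
  pvTournament_aux t C0 h t.length le_rfl


-- Int-level tournament step (as in the port) is the Nat-level pvStepB, through casts
theorem pvStepB_bridge (t : List Int) (C : List Nat) (j : Nat) :
    (let m := (PySem.List.min? ((C.map (fun k : Nat => (k : Int))).map
        (fun i => PySem.List.pyGetD t (PySem.Int.mod (i + (j : Int)) (t.length : Int)) 0)) (fun y => y)).getD 0;
      (C.map (fun k : Nat => (k : Int))).filter
        (fun i => PySem.List.pyGetD t (PySem.Int.mod (i + (j : Int)) (t.length : Int)) 0 == m))
    = (pvStepB t C j).map (fun k : Nat => (k : Int)) := by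
  have hval : ∀ k : Nat, PySem.List.pyGetD t (PySem.Int.mod ((k : Int) + (j : Int)) (t.length : Int)) 0 = pvVal t k j := by
    intro k
    rw [show ((k : Int) + (j : Int)) = ((k + j : Nat) : Int) by push_cast; ring,
        PySem.Int.mod_natCast, PySem.List.pyGetD_natCast]
    rfl
  unfold pvStepB
  simp only [List.map_map, List.filter_map, Function.comp_def, hval]

-- the whole tournament fold, through casts
theorem pvFold_bridge (t : List Int) (js : List Nat) (C : List Nat) :
    (js.map (fun j : Nat => (j : Int))).foldl
      (fun (cand : List Int) (j : Int) =>
        let m := (PySem.List.min? (cand.map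
            (fun i => PySem.List.pyGetD t (PySem.Int.mod (i + j) (t.length : Int)) 0)) (fun y => y)).getD 0
        cand.filter (fun i => PySem.List.pyGetD t (PySem.Int.mod (i + j) (t.length : Int)) 0 == m))
      (C.map (fun k : Nat => (k : Int)))
    = (js.foldl (pvStepB t) C).map (fun k : Nat => (k : Int)) := by
  induction js generalizing C with
  | nil => rfl
  | cons j rest ih =>
    rw [List.map_cons, List.foldl_cons, pvStepB_bridge t C j]
    exact ih (pvStepB t C j)

-- the Int filter over pyRange selecting max-gap starts, through casts
theorem pvC0_eq (s : List Int) (g : Int) :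
    (PySem.List.pyRange 0 (s.length : Int) 1).filter
      (fun i => PySem.List.pyGetD ((List.range s.length).map (fun i => 12 - pvSpan s i)) i 0 == g)
    = ((List.range s.length).filter (fun i => (12 - pvSpan s i) == g)).map (fun k : Nat => (k : Int)) := by
  rw [PySem.List.pyRange_zero_natCast, List.filter_map]
  congr 1
  apply List.filter_congr
  intro i hi
  have hi' : i < s.length := List.mem_range.mp hi
  simp only [Function.comp, PySem.List.pyGetD_natCast, PySem.List.getD_map_range _ _ _ _ hi']

theorem pvHead_cast (S : List Nat) (h : S ≠ []) :
    PySem.List.pyGetD (S.map (fun k : Nat => (k : Int))) 0 0 = ((S.headI : Nat) : Int) := by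
  cases S with
  | nil => exact absurd rfl h
  | cons a rest => simp [PySem.List.pyGetD_zero, List.headI]

theorem pvSlice_rotate (t : List Int) (i : Nat) (h : i ≤ t.length) :
    PySem.List.slice t (some (i : Int)) none ++ PySem.List.slice t none (some (i : Int))
    = t.rotate i := by
  rw [PySem.List.slice_from_natCast, PySem.List.slice_to_natCast,
      List.rotate_eq_drop_append_take h]

theorem pvRot_eq_rotate (s : List Int) (i : Nat) :
    pvRot s i = (s.map (fun x => PySem.Int.mod x 12)).rotate i := by
  unfold pvRot
  exact List.map_rotate _ _ _

-- B's whole >1-element branch computes the same pvMin fold minimum as A's loop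
theorem pvB_eq (s : List Int) (hpw : s.Pairwise (· < ·)) (h2 : 2 ≤ s.length) :
    (let t := s.map (fun x => PySem.Int.mod x 12)
     let gap := (PySem.List.pyGetD s 0 0 + 12 - PySem.List.pyGetD s (-1) 0) ::
       (PySem.List.pyRange 1 (s.length : Int) 1).map
         (fun i => PySem.List.pyGetD s i 0 - PySem.List.pyGetD s (i - 1) 0)
     let g := (PySem.List.max? gap (fun y => y)).getD 0
     let cand0 := (PySem.List.pyRange 0 (s.length : Int) 1).filter
       (fun i => PySem.List.pyGetD gap i 0 == g)
     let cand := (PySem.List.pyRange 0 (s.length : Int) 1).foldl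
       (fun (cand : List Int) (j : Int) =>
         let m := (PySem.List.min? (cand.map
             (fun i => PySem.List.pyGetD t (PySem.Int.mod (i + j) (s.length : Int)) 0)) (fun y => y)).getD 0
         cand.filter (fun i => PySem.List.pyGetD t (PySem.Int.mod (i + j) (s.length : Int)) 0 == m))
       cand0
     let i := PySem.List.pyGetD cand 0 0
     PySem.List.slice t (some i) none ++ PySem.List.slice t none (some i))
    = ((pvPairs s).foldl pvMin (100, s)).2 := by
  simp only [pvGaps_eq s h2]
  set t := s.map (fun x => PySem.Int.mod x 12) with ht
  have hlen : t.length = s.length := by rw [ht]; simp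
  set gapL := (List.range s.length).map (fun i => 12 - pvSpan s i) with hgapL
  -- the maximum gap g
  have hgne : gapL ≠ [] := by
    rw [hgapL]
    simp only [ne_eq, List.map_eq_nil_iff, List.range_eq_nil]
    omega
  obtain ⟨g, hg⟩ : ∃ g, PySem.List.max? gapL (fun y => y) = some g := by
    cases h : PySem.List.max? gapL (fun y => y) with
    | none => exact absurd ((PySem.List.max?_eq_none_iff _ _).mp h) hgne
    | some g => exact ⟨g, rfl⟩
  rw [hg]
  simp only [Option.getD_some]
  -- v := 12 - g is the minimum span
  have hvle : ∀ i, i < s.length → 12 - g ≤ pvSpan s i := by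
    intro i hi
    have := PySem.List.max?_isMax hg (12 - pvSpan s i)
      (List.mem_map_of_mem (List.mem_range.mpr hi))
    simp only at this
    omega
  have hvmem : ∃ i, i < s.length ∧ pvSpan s i = 12 - g := by
    have h := PySem.List.max?_mem hg
    rw [hgapL] at h
    simp only [List.mem_map, List.mem_range] at h
    obtain ⟨i, hi, he⟩ := h
    exact ⟨i, hi, by omega⟩
  -- candidate starts, as Nats
  rw [pvC0_eq s g]
  set C0 := (List.range s.length).filter (fun i => (12 - pvSpan s i) == g) with hC0
  have hC0mem : ∀ i, i ∈ C0 ↔ (i < s.length ∧ pvSpan s i = 12 - g) := by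
    intro i
    rw [hC0, List.mem_filter, List.mem_range]
    constructor
    · rintro ⟨h1, h3⟩
      refine ⟨h1, ?_⟩
      have := beq_iff_eq.mp h3
      omega
    · rintro ⟨h1, h3⟩
      exact ⟨h1, beq_iff_eq.mpr (by omega)⟩
  have hC0ne : C0 ≠ [] := by
    obtain ⟨i, hi, he⟩ := hvmem
    exact List.ne_nil_of_mem ((hC0mem i).mpr ⟨hi, he⟩)
  -- the tournament fold, as Nats
  rw [show (s.length : Int) = (t.length : Int) by rw [hlen]]
  rw [PySem.List.pyRange_zero_natCast]
  rw [pvFold_bridge t (List.range t.length) C0]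
  set S := (List.range t.length).foldl (pvStepB t) C0 with hS
  have hfin := pvInv_final t C0 S (pvTournament t C0 hC0ne)
  obtain ⟨hSne, hhead⟩ := hfin
  obtain ⟨hheadC0, hheadmin⟩ := hhead S.headI rfl
  set i0 := S.headI with hi0
  have hi0lt : i0 < s.length := ((hC0mem i0).mp hheadC0).1
  have hi0span : pvSpan s i0 = 12 - g := ((hC0mem i0).mp hheadC0).2
  rw [pvHead_cast S hSne, pvSlice_rotate t i0 (by omega)]
  -- the result is the rotation pvRot s i0; compare with A's fold
  rw [← pvRot_eq_rotate s i0]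
  -- A's fold facts
  have hmemPairs : ∀ i, i < s.length → (pvSpan s i, pvRot s i) ∈ pvPairs s := by
    intro i hi
    exact List.mem_map_of_mem (List.mem_range.mpr hi)
  have hFmem := pvFold_mem (pvPairs s) (100, s)
  have hFmin := pvFold_min (pvPairs s) (100, s)
  have h01 : s.getD 0 0 < s.getD 1 0 := by
    have h := List.pairwise_iff_getElem.mp hpw 0 1 (by omega) (by omega) (by omega)
    rw [List.getD_eq_getElem _ _ (by omega), List.getD_eq_getElem _ _ (by omega)]
    exact h
  have hspan1 : pvSpan s 1 < 100 := by
    unfold pvSpan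
    rw [if_neg one_ne_zero, show (1 : Nat) - 1 = 0 from rfl]
    omega
  have hF1 : ¬ pvLt (pvSpan s 1, pvRot s 1) ((pvPairs s).foldl pvMin (100, s)) :=
    hFmin _ (Or.inr (hmemPairs 1 (by omega)))
  have hFle : ((pvPairs s).foldl pvMin (100, s)).1 ≤ pvSpan s 1 := by
    by_contra hcon
    exact hF1 (Or.inl (by simpa using not_le.mp hcon))
  have hFin : (pvPairs s).foldl pvMin (100, s) ∈ pvPairs s := by
    rcases hFmem with heq | hin
    · exfalso
      rw [heq] at hFle
      simp only at hFle
      omega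
    · exact hin
  obtain ⟨i1, hi1, hFeq⟩ : ∃ i, i < s.length ∧ (pvPairs s).foldl pvMin (100, s) = (pvSpan s i, pvRot s i) := by
    have h : (pvPairs s).foldl pvMin (100, s) ∈ pvPairs s := hFin
    simp only [pvPairs, List.mem_map, List.mem_range] at h
    obtain ⟨i, hi, he⟩ := h
    exact ⟨i, hi, he.symm⟩
  -- the (span, rotation) pair of B's winner is minimal, hence equals A's fold
  have hrle : ∀ i, i < s.length → pvSpan s i = 12 - g → pvRot s i0 ≤ pvRot s i := by
    intro i hi hsp
    have hiC0 : i ∈ C0 := (hC0mem i).mpr ⟨hi, hsp⟩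
    have := hheadmin i hiC0
    rwa [← pvRot_eq_rotate s i0, ← pvRot_eq_rotate s i] at this
  have hnlt1 : ¬ pvLt (12 - g, pvRot s i0) ((pvPairs s).foldl pvMin (100, s)) := by
    have : ((12 - g : Int), pvRot s i0) ∈ pvPairs s := by
      rw [← hi0span]
      exact hmemPairs i0 hi0lt
    exact hFmin _ (Or.inr this)
  have hnlt2 : ¬ pvLt ((pvPairs s).foldl pvMin (100, s)) (12 - g, pvRot s i0) := by
    rw [hFeq]
    rintro (h | ⟨hh, h'⟩)
    · exact absurd h (not_lt.mpr (hvle i1 hi1))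
    · exact absurd h' (not_lt.mpr (hrle i1 hi1 hh))
  have hfinal : (pvPairs s).foldl pvMin (100, s) = (12 - g, pvRot s i0) :=
    pvLt_connex hnlt2 hnlt1
  rw [hfinal]

theorem fast_normal_order_eq_alt (pcs : List Int) :
    fast_normal_order pcs = fast_normal_order_alt pcs := by
  simp only [fast_normal_order, fast_normal_order_alt]
  set s := PySem.List.sorted (PySem.Set.ofList pcs) (fun x => x) false with hs
  have hpw : s.Pairwise (· < ·) := PySem.List.sorted_ofList_pairwise_lt pcs
  by_cases h0 : s = []
  · simp [h0]
  · rw [if_neg h0]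
    by_cases h1 : s.length = 1
    · rw [if_pos h1, if_pos (by omega)]
    · have hlen : s.length ≠ 0 := fun h => h0 (List.length_eq_zero_iff.mp h)
      have h2 : 2 ≤ s.length := by omega
      rw [if_neg h1, if_neg (by omega)]
      exact (pvA_eq s h2).trans (pvB_eq s hpw h2).symm

-- ===== VERDICT (by name: the statement is the Claim_ definition above) =====
theorem fast_normal_order_spec : Claim_equal_fast_normal_order := by
  intro pcs _
  exact fast_normal_order_eq_alt pcs
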